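-- pv_equiv track=rewrite | github.com/Pengu4566/PlexDirSort | PathGenerator.py | moviePathGen
-- ===== SOURCE A (Python) =====
-- MOVIE_PATH_A_F = "G:\\Movies\\a-f"
--
-- MOVIE_PATH_G_L = "G:\\Movies\\g-l"
--
-- MOVIE_PATH_M_R = "G:\\Movies\\m-r"
--
-- MOVIE_PATH_S_X = "G:\\Movies\\s-x"
--
-- MOVIE_PATH_Y_Z = "G:\\Movies\\y-z"
--
-- LETTERS_A_F = ["a", "b", "c", "d", "e", "f", "A", "B", "C", "D", "E", "F", "0", "1", "2", "3", "4", "5", "6", "7", "8", "9"]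
--
-- LETTERS_G_L = ["g", "h", "i", "j", "k", "l", "G", "H", "I", "J", "K", "L"]
--
-- LETTERS_M_R = ["m", "n", "o", "p", "q", "r", "M", "N", "O", "P", "Q", "R"]
--
-- LETTERS_S_X = ["s", "t", "u", "v", "w", "x", "S", "T", "U", "V", "W", "X"]
--
-- LETTERS_Y_Z = ["y", "z", "Y", "Z"]
--
-- def moviePathGen(torrent_name):
--     torrent_first_letter = str(torrent_name[0])
--
--     for letter in LETTERS_A_F:
--         if str(torrent_first_letter) == letter:
--             return MOVIE_PATH_A_F
--
--     for letter in LETTERS_G_L: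
--         if str(torrent_first_letter) == letter:
--             return MOVIE_PATH_G_L
--
--     for letter in LETTERS_M_R:
--         if str(torrent_first_letter) == letter:
--             return MOVIE_PATH_M_R
--
--     for letter in LETTERS_S_X:
--         if str(torrent_first_letter) == letter:
--             return MOVIE_PATH_S_X
--
--     for letter in LETTERS_Y_Z:
--         if str(torrent_first_letter) == letter:
--             return MOVIE_PATH_Y_Z
--
--     return MOVIE_PATH_A_F + "\\"
-- ===== SOURCE B (Python) =====
-- MOVIE_PATH_A_F = "G:\\Movies\\a-f"
-- MOVIE_PATH_G_L = "G:\\Movies\\g-l"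
-- MOVIE_PATH_M_R = "G:\\Movies\\m-r"
-- MOVIE_PATH_S_X = "G:\\Movies\\s-x"
-- MOVIE_PATH_Y_Z = "G:\\Movies\\y-z"
--
-- def moviePathGen(torrent_name):
--     c = str(torrent_name[0])
--     if 'a' <= c <= 'f' or 'A' <= c <= 'F' or '0' <= c <= '9':
--         return MOVIE_PATH_A_F
--     if 'g' <= c <= 'l' or 'G' <= c <= 'L':
--         return MOVIE_PATH_G_L
--     if 'm' <= c <= 'r' or 'M' <= c <= 'R':
--         return MOVIE_PATH_M_R
--     if 's' <= c <= 'x' or 'S' <= c <= 'X':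
--         return MOVIE_PATH_S_X
--     if 'y' <= c <= 'z' or 'Y' <= c <= 'Z':
--         return MOVIE_PATH_Y_Z
--     return MOVIE_PATH_A_F + "\\"
-- ===== Notes on version B (the rewrite author's own statement) =====
-- stated objective: simpler
-- what changed: Replaces the five list-scan loops over explicit letter lists with direct character-range comparisons on the first character.
import Mathlib
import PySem

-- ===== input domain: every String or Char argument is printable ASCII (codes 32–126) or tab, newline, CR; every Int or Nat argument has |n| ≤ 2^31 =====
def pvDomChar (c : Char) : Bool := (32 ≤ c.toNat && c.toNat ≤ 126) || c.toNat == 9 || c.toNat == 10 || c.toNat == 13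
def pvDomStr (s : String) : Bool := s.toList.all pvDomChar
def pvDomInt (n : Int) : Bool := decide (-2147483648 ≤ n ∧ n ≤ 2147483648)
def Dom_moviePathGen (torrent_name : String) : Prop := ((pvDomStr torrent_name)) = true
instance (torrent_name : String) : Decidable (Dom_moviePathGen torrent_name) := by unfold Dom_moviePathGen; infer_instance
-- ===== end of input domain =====

-- B replaces A's five linear scans of case/digit letter lists with direct character-range
-- comparisons on the first character (objective: simpler).

-- ===== PORT A =====
def MOVIE_PATH_A_F : String := "G:\\Movies\\a-f"
def MOVIE_PATH_G_L : String := "G:\\Movies\\g-l"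
def MOVIE_PATH_M_R : String := "G:\\Movies\\m-r"
def MOVIE_PATH_S_X : String := "G:\\Movies\\s-x"
def MOVIE_PATH_Y_Z : String := "G:\\Movies\\y-z"
-- Python's 1-char strings torrent_name[0] / "a" / … are ported as Char (equality of
-- 1-char strings = equality of their characters).
def LETTERS_A_F : List Char := ['a', 'b', 'c', 'd', 'e', 'f', 'A', 'B', 'C', 'D', 'E', 'F', '0', '1', '2', '3', '4', '5', '6', '7', '8', '9']
def LETTERS_G_L : List Char := ['g', 'h', 'i', 'j', 'k', 'l', 'G', 'H', 'I', 'J', 'K', 'L']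
def LETTERS_M_R : List Char := ['m', 'n', 'o', 'p', 'q', 'r', 'M', 'N', 'O', 'P', 'Q', 'R']
def LETTERS_S_X : List Char := ['s', 't', 'u', 'v', 'w', 'x', 'S', 'T', 'U', 'V', 'W', 'X']
def LETTERS_Y_Z : List Char := ['y', 'z', 'Y', 'Z']

-- Each 'for letter in L: if first == letter: return P' loop is the scan 'L.any (· == first)'.
def moviePathGen (torrent_name : String) : String :=
  match PySem.Str.pyGet? torrent_name 0 with
  | none => ""   -- torrent_name[0] raises IndexError on ""; excluded by Pre_
  | some torrent_first_letter =>
    if LETTERS_A_F.any (· == torrent_first_letter) then MOVIE_PATH_A_F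
    else if LETTERS_G_L.any (· == torrent_first_letter) then MOVIE_PATH_G_L
    else if LETTERS_M_R.any (· == torrent_first_letter) then MOVIE_PATH_M_R
    else if LETTERS_S_X.any (· == torrent_first_letter) then MOVIE_PATH_S_X
    else if LETTERS_Y_Z.any (· == torrent_first_letter) then MOVIE_PATH_Y_Z
    else MOVIE_PATH_A_F ++ "\\"

-- ===== PORT B =====
-- Source B's 1-char-string range comparisons 'a' <= c <= 'f' are ported as the identical
-- code-point comparisons on the Char c (exact: 1-char strings compare by code point).
def moviePathGen_alt (torrent_name : String) : String :=
  match PySem.Str.pyGet? torrent_name 0 with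
  | none => ""   -- torrent_name[0] raises IndexError on ""; excluded by Pre_
  | some c =>
    if ('a' ≤ c ∧ c ≤ 'f') ∨ ('A' ≤ c ∧ c ≤ 'F') ∨ ('0' ≤ c ∧ c ≤ '9') then MOVIE_PATH_A_F
    else if ('g' ≤ c ∧ c ≤ 'l') ∨ ('G' ≤ c ∧ c ≤ 'L') then MOVIE_PATH_G_L
    else if ('m' ≤ c ∧ c ≤ 'r') ∨ ('M' ≤ c ∧ c ≤ 'R') then MOVIE_PATH_M_R
    else if ('s' ≤ c ∧ c ≤ 'x') ∨ ('S' ≤ c ∧ c ≤ 'X') then MOVIE_PATH_S_X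
    else if ('y' ≤ c ∧ c ≤ 'z') ∨ ('Y' ≤ c ∧ c ≤ 'Z') then MOVIE_PATH_Y_Z
    else MOVIE_PATH_A_F ++ "\\"

-- ===== PRECONDITION & SPEC =====
-- Pre_ excludes only the empty string, on which A (and B) raise IndexError at torrent_name[0].
def Pre_moviePathGen (torrent_name : String) : Prop := torrent_name ≠ ""
instance (torrent_name : String) : Decidable (Pre_moviePathGen torrent_name) := by unfold Pre_moviePathGen; infer_instance
def pvWitness_moviePathGen : String := "Movie"
def Spec_moviePathGen (torrent_name : String) (out : String) : Prop := out = moviePathGen_alt torrent_name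
instance (torrent_name : String) (out : String) : Decidable (Spec_moviePathGen torrent_name out) := by unfold Spec_moviePathGen; infer_instance

-- ===== CLAIM (what is proved, stated in full; the proofs are below) =====
def Claim_equal_moviePathGen : Prop := ∀ (torrent_name : String), Dom_moviePathGen torrent_name → Pre_moviePathGen torrent_name → Spec_moviePathGen torrent_name (moviePathGen torrent_name)

-- ===== LEMMAS AND PROOFS =====

-- The two ports agree whenever the first character exists and lies in the ASCII domain;
-- checked exhaustively over code points below 128.
theorem ports_agree_of_some (t : String) (c : Char) (hc : c.toNat < 128)
    (hget : PySem.Str.pyGet? t 0 = some c) :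
    moviePathGen t = moviePathGen_alt t := by
  unfold moviePathGen moviePathGen_alt
  rw [hget]
  rw [← Char.ofNat_toNat c]
  revert hc
  generalize c.toNat = n
  revert n
  decide

theorem moviePathGen_spec : Claim_equal_moviePathGen := by
  intro t hdom hpre
  unfold Spec_moviePathGen
  have htl : t.toList ≠ [] := fun hl => hpre (String.toList_inj.mp (by simp [hl]))
  obtain ⟨c, rest, hc⟩ := List.exists_cons_of_ne_nil htl
  have hget : PySem.Str.pyGet? t 0 = some c := by
    simp [pysem, hc]
  have hdc : pvDomChar c = true := by
    have := (List.all_eq_true.mp hdom) c (by rw [hc]; exact List.mem_cons_self)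
    exact this
  have hlt : c.toNat < 128 := by
    simp [pvDomChar] at hdc
    omega
  exact (ports_agree_of_some t c hlt hget)
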